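-- pv_equiv track=rewrite | github.com/viaifoundation/ting | scripts/generate_plan_audio.py | split_chapters
-- ===== SOURCE A (Python) =====
-- def split_chapters(chapters: list, k: int) -> list[list]:
--     """Split chapters into k roughly equal groups (by count)."""
--     n = len(chapters)
--     base, r = divmod(n, k)
--     sizes = [base + 1] * r + [base] * (k - r)
--     result, idx = [], 0
--     for s in sizes:
--         result.append(chapters[idx : idx + s])
--         idx += s
--     return result
-- ===== SOURCE B (Python) =====
-- def split_chapters(chapters: list, k: int) -> list[list]:
--     """Split chapters into k roughly equal groups (by count)."""
--     n = len(chapters)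
--     base, r = divmod(n, k)
--     return [chapters[i * base + min(i, r) : (i + 1) * base + min(i + 1, r)]
--             for i in range(k)]
-- ===== Notes on version B (the rewrite author's own statement) =====
-- stated objective: simpler
-- what changed: B drops A's materialised sizes list and running idx accumulator and instead computes each group's slice boundaries in closed form (lo = i*base + min(i,r)) in a single comprehension over range(k).
import Mathlib
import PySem

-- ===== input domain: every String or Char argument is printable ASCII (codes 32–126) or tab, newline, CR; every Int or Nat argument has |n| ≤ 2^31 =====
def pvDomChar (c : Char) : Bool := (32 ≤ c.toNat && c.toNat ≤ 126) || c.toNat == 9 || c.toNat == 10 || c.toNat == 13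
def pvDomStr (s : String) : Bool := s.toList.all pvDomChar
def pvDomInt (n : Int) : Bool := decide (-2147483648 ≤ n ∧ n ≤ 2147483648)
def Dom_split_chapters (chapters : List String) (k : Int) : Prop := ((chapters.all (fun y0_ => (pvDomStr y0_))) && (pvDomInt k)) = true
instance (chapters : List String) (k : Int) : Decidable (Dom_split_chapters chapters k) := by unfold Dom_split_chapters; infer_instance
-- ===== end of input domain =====

-- B replaces A's materialised sizes list and running idx accumulator by closed-form
-- slice boundaries (lo = i*base + min(i,r)) in one comprehension over range(k): simpler.

-- ===== PORT A =====
def split_chapters (chapters : List String) (k : Int) : List (List String) :=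
  let n : Int := PySem.List.len chapters
  match PySem.Int.divmod? n k with
  | none => []  -- Python raises ZeroDivisionError here (k = 0); excluded by Pre_
  | some (base, r) =>
    -- sizes = [base + 1] * r + [base] * (k - r)   (Python list repetition: negative count = [])
    let sizes : List Int := List.replicate r.toNat (base + 1) ++ List.replicate (k - r).toNat base
    (sizes.foldl
      (fun (st : List (List String) × Int) s =>
        (st.1 ++ [PySem.List.slice chapters (some st.2) (some (st.2 + s))], st.2 + s))
      ([], 0)).1

-- ===== PORT B =====
def split_chapters_alt (chapters : List String) (k : Int) : List (List String) :=
  let n : Int := PySem.List.len chapters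
  match PySem.Int.divmod? n k with
  | none => []  -- Python raises ZeroDivisionError here (k = 0); excluded by Pre_
  | some (base, r) =>
    (PySem.List.pyRange 0 k 1).map (fun i =>
      PySem.List.slice chapters (some (i * base + min i r))
                                (some ((i + 1) * base + min (i + 1) r)))

-- ===== PRECONDITION & SPEC =====
-- Pre_ excludes exactly k = 0, on which Python's divmod raises ZeroDivisionError in both A and B.
def Pre_split_chapters (chapters : List String) (k : Int) : Prop := k ≠ 0
instance (chapters : List String) (k : Int) : Decidable (Pre_split_chapters chapters k) := by unfold Pre_split_chapters; infer_instance
def pvWitness_split_chapters : List String × Int := (["a", "b", "c"], 2)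

def Spec_split_chapters (chapters : List String) (k : Int) (out : List (List String)) : Prop := out = split_chapters_alt chapters k
instance (chapters : List String) (k : Int) (out : List (List String)) : Decidable (Spec_split_chapters chapters k out) := by unfold Spec_split_chapters; infer_instance

-- ===== CLAIM (what is proved, stated in full; the proofs are below) =====
def Claim_equal_split_chapters : Prop := ∀ (chapters : List String) (k : Int), Dom_split_chapters chapters k → Pre_split_chapters chapters k → Spec_split_chapters chapters k (split_chapters chapters k)

-- ===== LEMMAS AND PROOFS =====

-- A's loop as a structural recursion: the list of slices cut at the running offsets.
def pvChunks (chapters : List String) : List Int → Int → List (List String)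
  | [], _ => []
  | s :: rest, idx =>
      PySem.List.slice chapters (some idx) (some (idx + s)) :: pvChunks chapters rest (idx + s)

theorem pvChunks_foldl (chapters : List String) :
    ∀ (sizes : List Int) (acc : List (List String)) (idx : Int),
      (sizes.foldl
        (fun (st : List (List String) × Int) s =>
          (st.1 ++ [PySem.List.slice chapters (some st.2) (some (st.2 + s))], st.2 + s))
        (acc, idx)).1 = acc ++ pvChunks chapters sizes idx := by
  intro sizes
  induction sizes with
  | nil => intro acc idx; simp [pvChunks]
  | cons s rest ih =>
      intro acc idx
      simp only [List.foldl_cons, pvChunks]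
      rw [ih]
      simp

theorem pvChunks_append (chapters : List String) :
    ∀ (l₁ l₂ : List Int) (idx : Int),
      pvChunks chapters (l₁ ++ l₂) idx
        = pvChunks chapters l₁ idx ++ pvChunks chapters l₂ (idx + l₁.sum) := by
  intro l₁
  induction l₁ with
  | nil => intro l₂ idx; simp [pvChunks]
  | cons s rest ih =>
      intro l₂ idx
      simp only [List.cons_append, pvChunks, ih, List.sum_cons]
      rw [show idx + s + rest.sum = idx + (s + rest.sum) by ring]

theorem pvChunks_replicate (chapters : List String) (x : Int) :
    ∀ (a : Nat) (idx : Int),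
      pvChunks chapters (List.replicate a x) idx
        = (List.range a).map (fun (j : Nat) =>
            PySem.List.slice chapters (some (idx + (j : Int) * x)) (some (idx + (j : Int) * x + x))) := by
  intro a
  induction a with
  | zero => intro idx; simp [pvChunks]
  | succ a ih =>
      intro idx
      rw [List.replicate_succ, List.range_succ_eq_map]
      simp only [pvChunks, ih, List.map_cons, List.map_map, Nat.cast_zero]
      congr 1
      · norm_num
      · apply List.map_congr_left
        intro j _
        simp only [Function.comp_apply]
        rw [show idx + x + (j : Int) * x = idx + (↑(j + 1) : Int) * x by push_cast; ring]

-- ===== VERDICT (by name: the statement is the Claim_ definition above) =====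
theorem split_chapters_spec : Claim_equal_split_chapters := by
  intro chapters k _ hk
  have hk' : k ≠ 0 := hk
  have hd : PySem.Int.divmod? (PySem.List.len chapters) k
      = some (PySem.Int.floordiv (PySem.List.len chapters) k,
              PySem.Int.mod (PySem.List.len chapters) k) := by
    simp [PySem.Int.divmod?, PySem.Int.floordiv, PySem.Int.mod, hk']
  unfold Spec_split_chapters
  simp only [split_chapters, split_chapters_alt, hd]
  set base := PySem.Int.floordiv (PySem.List.len chapters) k with hbase
  set r := PySem.Int.mod (PySem.List.len chapters) k with hr
  rw [pvChunks_foldl]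
  simp only [List.nil_append]
  rcases lt_or_gt_of_ne hk' with hneg | hpos
  · -- k < 0 : both replication counts are nonpositive and range(k) is empty
    have hb := PySem.Int.mod_neg_bounds (PySem.List.len chapters) hneg
    rw [show r.toNat = 0 by omega, show (k - r).toNat = 0 by omega,
        PySem.List.pyRange_one_eq_nil hneg.le]
    simp [pvChunks]
  · -- k > 0
    have hr0 : 0 ≤ r := PySem.Int.mod_nonneg (PySem.List.len chapters) hpos
    have hrk : r < k := PySem.Int.mod_lt (PySem.List.len chapters) hpos
    have ha : ((r.toNat : Int)) = r := Int.toNat_of_nonneg hr0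
    rw [pvChunks_append, pvChunks_replicate, pvChunks_replicate,
        PySem.List.pyRange_one 0 k,
        show (k - 0).toNat = r.toNat + (k - r).toNat by omega,
        List.range_add]
    simp only [List.map_append, List.map_map, List.sum_replicate, nsmul_eq_mul]
    congr 1
    · apply List.map_congr_left
      intro j hj
      rw [List.mem_range] at hj
      have hjr : (j : Int) < r := by omega
      simp only [Function.comp_apply, zero_add]
      rw [show min ((j : Int)) r = (j : Int) by omega,
          show min ((j : Int) + 1) r = (j : Int) + 1 by omega,
          show (j : Int) * (base + 1) = (j : Int) * base + (j : Int) by ring]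
      rw [show (j : Int) * base + (j : Int) + (base + 1)
            = ((j : Int) + 1) * base + ((j : Int) + 1) by ring]
    · apply List.map_congr_left
      intro j hj
      rw [List.mem_range] at hj
      simp only [Function.comp_apply, zero_add]
      push_cast
      rw [show min ((r.toNat : Int) + (j : Int)) r = r by omega,
          show min ((r.toNat : Int) + (j : Int) + 1) r = r by omega]
      rw [show (r.toNat : Int) * (base + 1) + (j : Int) * base
            = ((r.toNat : Int) + (j : Int)) * base + r by rw [ha]; ring]
      rw [show ((r.toNat : Int) + (j : Int)) * base + r + base
            = ((r.toNat : Int) + (j : Int) + 1) * base + r by ring]
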